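-- pv_equiv track=rewrite | github.com/Sulynn7/Python_Practice | 8. List Comprehensions, Sets, and Dictionaries/8.6 Fuse.py | list_representation
-- ===== SOURCE A (Python) =====
-- def list_representation(number, n):
--     """
--     >>> grid = list_representation('1221133113322222', 4)
--     >>> grid
--     [[1, 2, 2, 1], [1, 3, 3, 1], [1, 3, 3, 2], [2, 2, 2, 2]]
--     """
--     grid = []
--     inner = []
--     for l in number:
--         inner.append(int(l))
--         if len(inner) == n:
--             grid.append(inner)
--             inner = []
--     return grid
-- ===== SOURCE B (Python) =====
-- def list_representation(number, n):
--     digits = [int(c) for c in number]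
--     if n <= 0:
--         return []
--     stop = len(digits) - len(digits) % n
--     return [digits[i:i + n] for i in range(0, stop, n)]
-- ===== Notes on version B (the rewrite author's own statement) =====
-- stated objective: idiomatic
-- what changed: B computes the truncated length up front and builds each row by slicing the string at chunk start indices (range stepped by n, with an n<=0 guard), instead of A's per-character loop that accumulates a buffer and flushes it when it reaches length n.
import Mathlib
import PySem

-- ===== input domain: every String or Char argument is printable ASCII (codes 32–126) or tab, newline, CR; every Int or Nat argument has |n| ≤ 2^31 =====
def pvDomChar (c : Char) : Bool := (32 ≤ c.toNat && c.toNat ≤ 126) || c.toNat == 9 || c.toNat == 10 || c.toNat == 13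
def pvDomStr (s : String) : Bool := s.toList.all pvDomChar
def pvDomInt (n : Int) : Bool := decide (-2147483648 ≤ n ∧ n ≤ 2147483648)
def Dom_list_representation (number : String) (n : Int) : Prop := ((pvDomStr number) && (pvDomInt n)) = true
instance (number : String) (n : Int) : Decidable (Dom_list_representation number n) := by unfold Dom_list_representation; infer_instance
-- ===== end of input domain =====

-- B builds the grid by slicing complete n-wide chunks at computed start indices instead of
-- accumulating chars in a buffer that is flushed when full (objective: idiomatic; same cost).

-- int(l) for a single character l; Pre_ restricts to digit characters, where Python returns a value
def pyIntChar (l : Char) : Int := (PySem.Int.ofChars? [l]).getD 0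

-- ===== PORT A =====
def stepA (n : Int) (st : List (List Int) × List Int) (l : Char) : List (List Int) × List Int :=
  let inner := st.2 ++ [pyIntChar l]
  if (inner.length : Int) = n then (st.1 ++ [inner], []) else (st.1, inner)

def list_representation (number : String) (n : Int) : List (List Int) :=
  (number.toList.foldl (stepA n) ([], [])).1

-- ===== PORT B =====
def list_representation_alt (number : String) (n : Int) : List (List Int) :=
  let digits := number.toList.map pyIntChar
  if n ≤ 0 then []
  else
    (PySem.List.pyRange 0
        ((digits.length : Int) - PySem.Int.mod (digits.length : Int) n) n).map
      (fun i => PySem.List.slice digits (some i) (some (i + n)))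

-- ===== PRECONDITION & SPEC =====
-- Pre_ excludes strings with a non-digit character: Python's int(l) raises ValueError there.
def Pre_list_representation (number : String) (n : Int) : Prop :=
  number.toList.all (fun c => '0' ≤ c && c ≤ '9') = true
instance (number : String) (n : Int) : Decidable (Pre_list_representation number n) := by
  unfold Pre_list_representation; infer_instance
def pvWitness_list_representation : String × Int := ("1221133113322222", 4)

def Spec_list_representation (number : String) (n : Int) (out : List (List Int)) : Prop := out = list_representation_alt number n
instance (number : String) (n : Int) (out : List (List Int)) : Decidable (Spec_list_representation number n out) := by unfold Spec_list_representation; infer_instance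

-- ===== CLAIM (what is proved, stated in full; the proofs are below) =====
def Claim_equal_list_representation : Prop := ∀ (number : String) (n : Int), Dom_list_representation number n → Pre_list_representation number n → Spec_list_representation number n (list_representation number n)

-- ===== LEMMAS AND PROOFS =====

-- the n-wide complete chunks of ys (shared characterisation both ports are proved equal to)
def chunks (m : Nat) (ys : List Int) : List (List Int) :=
  if 0 < m ∧ m ≤ ys.length then ys.take m :: chunks m (ys.drop m) else []
termination_by ys.length
decreasing_by simp; omega

theorem loopA_nonpos (n : Int) (hn : n ≤ 0) :
    ∀ (xs : List Char) (grid : List (List Int)) (inner : List Int),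
      (xs.foldl (stepA n) (grid, inner)).1 = grid := by
  intro xs
  induction xs with
  | nil => intro grid inner; rfl
  | cons l xs ih =>
    intro grid inner
    have hne : ¬ (((inner ++ [pyIntChar l]).length : Int) = n) := by
      simp; omega
    simp only [List.foldl_cons, stepA, if_neg hne]
    exact ih grid (inner ++ [pyIntChar l])

theorem loopA_pos (m : Nat) (hm : 0 < m) :
    ∀ (xs : List Char) (grid : List (List Int)) (inner : List Int), inner.length < m →
      (xs.foldl (stepA (m : Int)) (grid, inner)).1
        = grid ++ chunks m (inner ++ xs.map pyIntChar) := by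
  intro xs
  induction xs with
  | nil =>
    intro grid inner hlt
    rw [chunks]
    simp [Nat.not_le.mpr hlt]
  | cons l xs ih =>
    intro grid inner hlt
    by_cases h : (inner ++ [pyIntChar l]).length = m
    · have hi : (((inner ++ [pyIntChar l]).length : Int) = (m : Int)) := by exact_mod_cast h
      simp only [List.foldl_cons, stepA, if_pos hi]
      rw [ih (grid ++ [inner ++ [pyIntChar l]]) [] hm]
      have hch : chunks m (inner ++ (l :: xs).map pyIntChar)
          = (inner ++ [pyIntChar l]) :: chunks m (xs.map pyIntChar) := by
        rw [chunks]
        have hlen : (inner ++ (l :: xs).map pyIntChar).length = m + xs.length := by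
          simp at h ⊢; omega
        have hcond : 0 < m ∧ m ≤ (inner ++ (l :: xs).map pyIntChar).length := by
          constructor
          · exact hm
          · omega
        rw [if_pos hcond]
        have hsplit : inner ++ (l :: xs).map pyIntChar
            = (inner ++ [pyIntChar l]) ++ xs.map pyIntChar := by simp
        rw [hsplit, List.take_left' h, List.drop_left' h]
      rw [hch]
      simp
    · have hi : ¬ (((inner ++ [pyIntChar l]).length : Int) = (m : Int)) := by
        intro hc; exact h (by exact_mod_cast hc)
      simp only [List.foldl_cons, stepA, if_neg hi]
      have hlt' : (inner ++ [pyIntChar l]).length < m := by simp at h ⊢; omega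
      rw [ih grid (inner ++ [pyIntChar l]) hlt']
      congr 2
      simp

theorem chunks_eq_map_range (m : Nat) (hm : 0 < m) :
    ∀ (N : Nat) (ys : List Int), ys.length ≤ N →
      chunks m ys = (List.range (ys.length / m)).map (fun k => (ys.drop (k * m)).take m) := by
  intro N
  induction N with
  | zero =>
    intro ys hN
    rw [chunks, if_neg (by omega)]
    have hq : ys.length / m = 0 := Nat.div_eq_of_lt (by omega)
    simp [hq]
  | succ N ih =>
    intro ys hN
    by_cases hc : m ≤ ys.length
    · rw [chunks, if_pos ⟨hm, hc⟩]
      have hdl : (ys.drop m).length = ys.length - m := by simp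
      have hq : ys.length / m = (ys.length - m) / m + 1 := by
        conv_lhs => rw [Nat.div_eq]
        simp [hm, hc]
      rw [ih (ys.drop m) (by omega), hdl, hq, List.range_succ_eq_map]
      simp only [List.map_cons, List.map_map]
      congr 1
      · simp
      · apply List.map_congr_left
        intro k _
        have hkm : (k + 1) * m = k * m + m := by ring
        simp [Function.comp, List.drop_drop, hkm, Nat.add_comm]
    · rw [chunks, if_neg (by omega)]
      have hq : ys.length / m = 0 := Nat.div_eq_of_lt (by omega)
      simp [hq]

theorem count_eq (m S q : Nat) (hm : 0 < m) (hSq : S = q * m) :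
    (if (0:Int) < (S:Int) then (((S:Int) - 0 + (m:Int) - 1) / (m:Int)).toNat else 0) = q := by
  by_cases hS0 : 0 < S
  · rw [if_pos (by exact_mod_cast hS0)]
    have h1 : ((S:Int) - 0 + (m:Int) - 1) = ((S + m - 1 : Nat) : Int) := by
      omega
    have h2 : ((S + m - 1 : Nat) : Int) / ((m : Nat) : Int) = (((S + m - 1) / m : Nat) : Int) :=
      (Int.natCast_div (S + m - 1) m).symm
    rw [h1, h2, Int.toNat_natCast]
    have hcomm : q * m = m * q := Nat.mul_comm q m
    have hform : S + m - 1 = m * q + (m - 1) := by omega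
    rw [hform, Nat.mul_add_div hm, Nat.div_eq_of_lt (by omega : m - 1 < m)]
    omega
  · rw [if_neg (by exact_mod_cast hS0)]
    have h0 : S = 0 := by omega
    rcases Nat.mul_eq_zero.mp (by rw [← hSq, h0] : q * m = 0) with h | h
    · omega
    · omega

theorem altB_pos (number : String) (m : Nat) (hm : 0 < m) :
    list_representation_alt number (m : Int) = chunks m (number.toList.map pyIntChar) := by
  have hm' : (0 : Int) < (m : Int) := by exact_mod_cast hm
  unfold list_representation_alt
  rw [if_neg (by omega)]
  set ds := number.toList.map pyIntChar with hds
  have hmle : ds.length % m ≤ ds.length := Nat.mod_le _ _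
  have hstop : ((ds.length : Nat) : Int) - PySem.Int.mod ((ds.length : Nat) : Int) (m : Int)
      = ((ds.length - ds.length % m : Nat) : Int) := by
    rw [PySem.Int.mod_natCast, Nat.cast_sub hmle]
  have hSq : ds.length - ds.length % m = (ds.length / m) * m := by
    have h1 := Nat.div_add_mod ds.length m
    have h2 : m * (ds.length / m) = (ds.length / m) * m := Nat.mul_comm _ _
    omega
  rw [hstop, PySem.List.pyRange_of_pos 0 _ hm',
    count_eq m (ds.length - ds.length % m) (ds.length / m) hm hSq,
    chunks_eq_map_range m hm ds.length ds le_rfl]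
  simp only [List.map_map]
  apply List.map_congr_left
  intro k _
  simp only [Function.comp]
  have harg : (0 : Int) + (m : Int) * (k : Int) = ((k * m : Nat) : Int) := by push_cast; ring
  rw [harg]
  have hstep : ((k * m : Nat) : Int) + (m : Int) = ((k * m : Nat) : Int) + ((m : Nat) : Int) := rfl
  rw [hstep, PySem.List.slice_natCast_add ds (k * m) m]

-- ===== VERDICT (by name: the statement is the Claim_ definition above) =====
theorem list_representation_spec : Claim_equal_list_representation := by
  intro number n _hdom _hpre
  unfold Spec_list_representation
  by_cases hn : n ≤ 0
  · unfold list_representation list_representation_alt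
    rw [if_pos hn]
    exact loopA_nonpos n hn number.toList [] []
  · have hn' : 0 < n := by omega
    obtain ⟨m, rfl⟩ : ∃ m : Nat, n = (m : Int) := ⟨n.toNat, (Int.toNat_of_nonneg (by omega)).symm⟩
    have hm : 0 < m := by exact_mod_cast hn'
    rw [altB_pos number m hm]
    unfold list_representation
    have := loopA_pos m hm number.toList [] [] (by simpa using hm)
    simpa using this
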